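-- pv_equiv track=rewrite | github.com/remekozicki/ASD | do_kolosa3/kol_zal_1_21_z2/zad2.py | DFS
-- ===== SOURCE A (Python) =====
-- def DFSrec(G,visited,parent,u,n):
--
--     visited[u] = True
--
--     for v in range(n):
--         if not visited[v] and G[u][v] != 0:
--             parent[v] = u
--             DFSrec(G, visited,parent,v,n)
--
-- def DFS(G):
--
--     n = len(G)
--
--     visited = [False for i in range(n)]
--     parent = [None for i in range(n)]
--
--     best_res = -1
--     for u in range(n):
--         counter = 0
--         visited = [False for i in range(n)]
--         parent = [None for i in range(n)]
--         DFSrec(G,visited,parent,u,n)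
--
--         for i in parent:
--             if i == u:
--                 counter += 1
--
--         if best_res < counter and counter > 1:
--             best_res = counter
--             res = u
--
--     if best_res == -1:
--         return None
--     return res
-- ===== SOURCE B (Python) =====
-- def DFS(G):
--     n = len(G)
--     best = None
--     best_cnt = 1
--     for u in range(n):
--         visited = [False] * n
--         visited[u] = True
--         cnt = 0
--         stack = [(u, 0)]
--         while stack:
--             node, j = stack[-1]
--             while j < n and not (not visited[j] and G[node][j] != 0):
--                 j += 1
--             if j < n:
--                 stack[-1] = (node, j + 1)
--                 visited[j] = True
--                 if node == u:
--                     cnt += 1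
--                 stack.append((j, 0))
--             else:
--                 stack.pop()
--         if cnt > best_cnt:
--             best = u
--             best_cnt = cnt
--     return best
-- ===== Notes on version B (the rewrite author's own statement) =====
-- stated objective: alternative
-- what changed: The recursive DFS with in-place visited/parent arrays and a separate parent-counting pass is replaced by an explicit stack machine that resumes each frame's neighbour scan and counts the root's children inline, with no parent array at all.
-- outside the precondition, e.g. on DFS([[1, 1], [5]]): A returns None, B returns None
import Mathlib
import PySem

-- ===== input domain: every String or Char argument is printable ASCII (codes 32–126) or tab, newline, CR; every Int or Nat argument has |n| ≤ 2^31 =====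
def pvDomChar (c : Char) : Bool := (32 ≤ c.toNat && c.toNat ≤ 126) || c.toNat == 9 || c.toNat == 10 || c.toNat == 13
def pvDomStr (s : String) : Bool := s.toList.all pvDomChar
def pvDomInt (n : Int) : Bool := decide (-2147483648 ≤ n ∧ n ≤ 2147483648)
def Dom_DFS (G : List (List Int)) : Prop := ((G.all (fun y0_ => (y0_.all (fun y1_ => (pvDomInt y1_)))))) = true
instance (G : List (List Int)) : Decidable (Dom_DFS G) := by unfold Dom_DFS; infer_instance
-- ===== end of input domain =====

-- B replaces the recursive DFS + parent array + counting pass by an explicit stack machine that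
-- resumes each frame's neighbour scan and counts the root's children inline (alternative decomposition, same cost).

-- ===== PORT A =====
-- G[u][v]; exact under Pre_DFS (every row has length ≥ n and all indices used are < n)
def pvEntry (G : List (List Int)) (u v : Nat) : Int := (G.getD u []).getD v 0

-- DFSrec's `for v in range(n)` loop, scanning node u from index v; the nested call
-- `parent[v] = u; DFSrec(G,visited,parent,v,n)` is inlined as `parent.set v (some u)` plus the
-- callee's entry assignment `visited[v] = True` followed by its own scan from 0.
-- `fuel` bounds the recursion depth; each nested call marks a fresh vertex visited, so any
-- fuel ≥ number of unvisited vertices (in DFS below: n) never hits the 0 branch.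
def dfsScanA (G : List (List Int)) (n : Nat) :
    Nat → Nat → Nat → List Bool → List (Option Nat) → List Bool × List (Option Nat)
  | fuel, u, v, visited, parent =>
    if h : v < n then
      if ¬ visited.getD v false ∧ pvEntry G u v ≠ 0 then
        match fuel with
        | 0 => (visited, parent)
        | fuel' + 1 =>
          let r := dfsScanA G n fuel' v 0 (visited.set v true) (parent.set v (some u))
          dfsScanA G n (fuel' + 1) u (v + 1) r.1 r.2
      else dfsScanA G n fuel u (v + 1) visited parent
    else (visited, parent)
  termination_by fuel _ v _ _ => (fuel, n - v)
  decreasing_by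
    · exact Prod.Lex.left _ _ (Nat.lt_succ_self _)
    · exact Prod.Lex.right _ (by omega)
    · exact Prod.Lex.right _ (by omega)

-- DFSrec(G, visited, parent, u, n): visited[u] = True, then the scan loop
def dfsRecA (G : List (List Int)) (n fuel u : Nat) (visited : List Bool)
    (parent : List (Option Nat)) : List Bool × List (Option Nat) :=
  dfsScanA G n fuel u 0 (visited.set u true) parent

def DFS (G : List (List Int)) : Option Int :=
  let n := G.length
  let st := (List.range n).foldl
    (fun (st : Int × Option Int) u =>
      let visited := List.replicate n false
      let parent : List (Option Nat) := List.replicate n none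
      let r := dfsRecA G n n u visited parent
      let counter := r.2.foldl (fun (c : Int) i => if i = some u then c + 1 else c) 0
      if st.1 < counter ∧ 1 < counter then (counter, some (u : Int)) else st)
    (-1, none)
  if st.1 = -1 then none else st.2

-- ===== PORT B =====
-- the inner `while j < n and not (not visited[j] and G[node][j] != 0): j += 1`
def findNextB (G : List (List Int)) (n : Nat) (visited : List Bool) (node : Nat) :
    Nat → Nat
  | j =>
    if h : j < n then
      if ¬ (¬ visited.getD j false ∧ pvEntry G node j ≠ 0) then
        findNextB G n visited node (j + 1)
      else j
    else j
  termination_by j => n - j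
  decreasing_by omega

-- the outer `while stack:` loop; head of the list = top of the stack.
-- `fuel` bounds the iteration count; every iteration pushes (marking a fresh vertex) or pops,
-- so any fuel ≥ 2 * number of unvisited vertices + stack size (in DFS_alt: 2*n+2) suffices.
def runB (G : List (List Int)) (n u : Nat) :
    Nat → List (Nat × Nat) → List Bool → Int → Int
  | 0, _, _, cnt => cnt
  | _ + 1, [], _, cnt => cnt
  | fuel + 1, (node, j) :: rest, visited, cnt =>
    let j' := findNextB G n visited node j
    if j' < n then
      runB G n u fuel ((j', 0) :: (node, j' + 1) :: rest) (visited.set j' true)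
        (if node = u then cnt + 1 else cnt)
    else
      runB G n u fuel rest visited cnt

def DFS_alt (G : List (List Int)) : Option Int :=
  let n := G.length
  let st := (List.range n).foldl
    (fun (st : Option Int × Int) u =>
      let visited := (List.replicate n false).set u true
      let cnt := runB G n u (2 * n + 2) [(u, 0)] visited 0
      if st.2 < cnt then (some (u : Int), cnt) else st)
    (none, 1)
  st.1

-- ===== PRECONDITION & SPEC =====
-- Pre_DFS excludes ragged matrices (a row shorter than len(G)), on which Python's G[u][v] scan
-- raises IndexError; on a few such inputs the short entries are skipped because their column is
-- already visited and A still returns — excluded all the same for a closed form.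
def Pre_DFS (G : List (List Int)) : Prop := ∀ row ∈ G, G.length ≤ row.length
instance (G : List (List Int)) : Decidable (Pre_DFS G) := by unfold Pre_DFS; infer_instance

def pvWitness_DFS : List (List Int) := [[0, 1, 1], [0, 0, 0], [0, 0, 0]]

def Spec_DFS (G : List (List Int)) (out : Option Int) : Prop := out = DFS_alt G
instance (G : List (List Int)) (out : Option Int) : Decidable (Spec_DFS G out) := by unfold Spec_DFS; infer_instance

-- ===== CLAIM (what is proved, stated in full; the proofs are below) =====
def Claim_equal_DFS : Prop := ∀ (G : List (List Int)), Dom_DFS G → Pre_DFS G → Spec_DFS G (DFS G)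

-- ===== LEMMAS AND PROOFS =====

-- proof-side skeleton of one DFSrec scan: final visited set and the number of direct
-- adoptions performed by THIS frame (same fuel discipline as dfsScanA, no parent array)
def scanS (G : List (List Int)) (n : Nat) :
    Nat → Nat → Nat → List Bool → List Bool × Int
  | fuel, u, v, visited =>
    if h : v < n then
      if ¬ visited.getD v false ∧ pvEntry G u v ≠ 0 then
        match fuel with
        | 0 => (visited, 0)
        | fuel' + 1 =>
          let c := scanS G n fuel' v 0 (visited.set v true)
          let k := scanS G n (fuel' + 1) u (v + 1) c.1
          (k.1, k.2 + 1)
      else scanS G n fuel u (v + 1) visited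
    else (visited, 0)
  termination_by fuel _ v _ => (fuel, n - v)
  decreasing_by
    · exact Prod.Lex.left _ _ (Nat.lt_succ_self _)
    · exact Prod.Lex.right _ (by omega)
    · exact Prod.Lex.right _ (by omega)

-- the value of A's counting pass over the parent array
def countU : List (Option Nat) → Nat → Int
  | [], _ => 0
  | a :: t, u => (if a = some u then 1 else 0) + countU t u

def cFalse (vis : List Bool) : Nat := vis.count false

-- getD/set helpers
theorem getD_set_self (l : List Bool) (i : Nat) (h : i < l.length) :
    (l.set i true).getD i false = true := by
  simp [List.getD_eq_getElem?_getD, h]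

theorem getD_set_ne (l : List Bool) (i j : Nat) (h : i ≠ j) :
    (l.set i true).getD j false = l.getD j false := by
  simp [List.getD_eq_getElem?_getD, List.getElem?_set_ne h]

theorem cFalse_pos (l : List Bool) (i : Nat) (h : i < l.length)
    (h2 : l.getD i false = false) : 0 < cFalse l := by
  have hi : l[i] = false := by rw [← List.getD_eq_getElem l false h]; exact h2
  exact List.count_pos_iff.mpr (hi ▸ List.getElem_mem h)

theorem cFalse_set (l : List Bool) (i : Nat) (h : i < l.length)
    (h2 : l.getD i false = false) : cFalse l = cFalse (l.set i true) + 1 := by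
  have hi : l[i] = false := by rw [← List.getD_eq_getElem l false h]; exact h2
  have hp := cFalse_pos l i h h2
  unfold cFalse at *
  rw [List.count_set h, hi]
  simp; omega

-- unfolding equations for scanS
theorem scanS_stop (G : List (List Int)) (n f u v : Nat) (vis : List Bool) (h : ¬ v < n) :
    scanS G n f u v vis = (vis, 0) := by
  rw [scanS.eq_def]; simp [h]

theorem scanS_skip (G : List (List Int)) (n f u v : Nat) (vis : List Bool) (h1 : v < n)
    (h2 : ¬ (¬ vis.getD v false = true ∧ pvEntry G u v ≠ 0)) :
    scanS G n f u v vis = scanS G n f u (v + 1) vis := by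
  rw [scanS.eq_def]; simp only [dif_pos h1, if_neg h2]

theorem scanS_zero (G : List (List Int)) (n u v : Nat) (vis : List Bool) (h1 : v < n)
    (h2 : ¬ vis.getD v false = true ∧ pvEntry G u v ≠ 0) :
    scanS G n 0 u v vis = (vis, 0) := by
  rw [scanS.eq_def]; simp only [dif_pos h1, if_pos h2]

theorem scanS_adopt (G : List (List Int)) (n f u v : Nat) (vis : List Bool) (h1 : v < n)
    (h2 : ¬ vis.getD v false = true ∧ pvEntry G u v ≠ 0) :
    scanS G n (f + 1) u v vis =
      ((scanS G n (f + 1) u (v + 1) (scanS G n f v 0 (vis.set v true)).1).1,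
       (scanS G n (f + 1) u (v + 1) (scanS G n f v 0 (vis.set v true)).1).2 + 1) := by
  rw [scanS.eq_def]; simp only [dif_pos h1, if_pos h2]

-- unfolding equations for dfsScanA
theorem dfsScanA_stop (G : List (List Int)) (n f u v : Nat) (vis : List Bool)
    (par : List (Option Nat)) (h : ¬ v < n) : dfsScanA G n f u v vis par = (vis, par) := by
  rw [dfsScanA.eq_def]; simp [h]

theorem dfsScanA_skip (G : List (List Int)) (n f u v : Nat) (vis : List Bool)
    (par : List (Option Nat)) (h1 : v < n)
    (h2 : ¬ (¬ vis.getD v false = true ∧ pvEntry G u v ≠ 0)) :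
    dfsScanA G n f u v vis par = dfsScanA G n f u (v + 1) vis par := by
  rw [dfsScanA.eq_def]; simp only [dif_pos h1, if_neg h2]

theorem dfsScanA_zero (G : List (List Int)) (n u v : Nat) (vis : List Bool)
    (par : List (Option Nat)) (h1 : v < n)
    (h2 : ¬ vis.getD v false = true ∧ pvEntry G u v ≠ 0) :
    dfsScanA G n 0 u v vis par = (vis, par) := by
  rw [dfsScanA.eq_def]; simp only [dif_pos h1, if_pos h2]

theorem dfsScanA_adopt (G : List (List Int)) (n f u v : Nat) (vis : List Bool)
    (par : List (Option Nat)) (h1 : v < n)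
    (h2 : ¬ vis.getD v false = true ∧ pvEntry G u v ≠ 0) :
    dfsScanA G n (f + 1) u v vis par =
      dfsScanA G n (f + 1) u (v + 1)
        (dfsScanA G n f v 0 (vis.set v true) (par.set v (some u))).1
        (dfsScanA G n f v 0 (vis.set v true) (par.set v (some u))).2 := by
  rw [dfsScanA.eq_def]; simp only [dif_pos h1, if_pos h2]

-- structural lemmas about scanS's visited component
theorem scanS_length (G : List (List Int)) (n : Nat) (f u v : Nat) (vis : List Bool) :
    ((scanS G n f u v vis).1).length = vis.length := by
  induction f, u, v, vis using scanS.induct G n with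
  | case1 u v vis h1 h2 => rw [scanS_zero G n u v vis h1 h2]
  | case2 u v vis h1 h2 f' c ih1 ih2 =>
    rw [scanS_adopt G n f' u v vis h1 h2]
    dsimp only
    rw [ih2, ih1, List.length_set]
  | case3 f u v vis h1 h2 ih => rw [scanS_skip G n f u v vis h1 h2]; exact ih
  | case4 f u v vis h1 => rw [scanS_stop G n f u v vis h1]

theorem scanS_true_mono (G : List (List Int)) (n : Nat) (f u v : Nat) (vis : List Bool)
    (w : Nat) (hw : vis.getD w false = true) :
    ((scanS G n f u v vis).1).getD w false = true := by
  induction f, u, v, vis using scanS.induct G n generalizing w with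
  | case1 u v vis h1 h2 => rw [scanS_zero G n u v vis h1 h2]; exact hw
  | case2 u v vis h1 h2 f' c ih1 ih2 =>
    rw [scanS_adopt G n f' u v vis h1 h2]
    dsimp only
    apply ih2
    apply ih1
    rcases eq_or_ne v w with rfl | hne
    · refine getD_set_self _ _ ?_
      by_contra hc
      rw [List.getD_eq_default _ _ (by omega)] at hw
      simp at hw
    · rw [getD_set_ne _ _ _ hne]; exact hw
  | case3 f u v vis h1 h2 ih => rw [scanS_skip G n f u v vis h1 h2]; exact ih _ hw
  | case4 f u v vis h1 => rw [scanS_stop G n f u v vis h1]; exact hw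

theorem scanS_cfalse_le (G : List (List Int)) (n : Nat) (f u v : Nat) (vis : List Bool) :
    cFalse (scanS G n f u v vis).1 ≤ cFalse vis := by
  induction f, u, v, vis using scanS.induct G n with
  | case1 u v vis h1 h2 => rw [scanS_zero G n u v vis h1 h2]
  | case2 u v vis h1 h2 f' c ih1 ih2 =>
    rw [scanS_adopt G n f' u v vis h1 h2]
    dsimp only
    refine le_trans (le_trans ih2 ih1) ?_
    unfold cFalse
    rcases Nat.lt_or_ge v vis.length with hv | hv
    · have hvv : vis.getD v false = false := by
        rcases Bool.eq_false_or_eq_true (vis.getD v false) with h | h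
        · exact absurd h h2.1
        · exact h
      have := cFalse_set vis v hv hvv
      unfold cFalse at this; omega
    · rw [List.set_eq_of_length_le (by omega)]
  | case3 f u v vis h1 h2 ih => rw [scanS_skip G n f u v vis h1 h2]; exact ih
  | case4 f u v vis h1 => rw [scanS_stop G n f u v vis h1]
theorem bool_false {b : Bool} (h : ¬ b = true) : b = false := by
  cases b
  · rfl
  · exact absurd rfl h

theorem fnB_step (G : List (List Int)) (n : Nat) (vis : List Bool) (node j : Nat)
    (h1 : j < n) (h2 : ¬ (¬ vis.getD j false = true ∧ pvEntry G node j ≠ 0)) :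
    findNextB G n vis node j = findNextB G n vis node (j + 1) := by
  rw [findNextB.eq_def]; simp only [dif_pos h1, if_pos h2]

theorem fnB_found (G : List (List Int)) (n : Nat) (vis : List Bool) (node j : Nat)
    (h1 : j < n) (h2 : ¬ vis.getD j false = true ∧ pvEntry G node j ≠ 0) :
    findNextB G n vis node j = j := by
  rw [findNextB.eq_def]; simp only [dif_pos h1, if_neg (not_not_intro h2)]

theorem fnB_stop (G : List (List Int)) (n : Nat) (vis : List Bool) (node j : Nat)
    (h1 : ¬ j < n) : findNextB G n vis node j = j := by
  rw [findNextB.eq_def]; simp only [dif_neg h1]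

theorem scanS_mono (G : List (List Int)) (n : Nat) (f u v : Nat) (vis : List Bool)
    (hlen : n ≤ vis.length) (hf : cFalse vis ≤ f) :
    scanS G n f u v vis = scanS G n (f + 1) u v vis := by
  induction f, u, v, vis using scanS.induct G n with
  | case1 u v vis h1 h2 =>
    exact absurd (cFalse_pos vis v (by omega) (bool_false h2.1)) (by omega)
  | case2 u v vis h1 h2 f' c ih1 ih2 =>
    have hv : vis.getD v false = false := bool_false h2.1
    have hc := cFalse_set vis v (by omega) hv
    rw [scanS_adopt G n f' u v vis h1 h2, scanS_adopt G n (f' + 1) u v vis h1 h2]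
    rw [← ih1 (by simpa using hlen) (by omega)]
    rw [← ih2 (by rw [scanS_length]; simpa using hlen)
        (le_trans (scanS_cfalse_le G n f' v 0 (vis.set v true)) (by omega))]
  | case3 f u v vis h1 h2 ih =>
    rw [scanS_skip G n f u v vis h1 h2, scanS_skip G n (f + 1) u v vis h1 h2]
    exact ih hlen hf
  | case4 f u v vis h1 =>
    rw [scanS_stop G n f u v vis h1, scanS_stop G n (f + 1) u v vis h1]

theorem scanS_ge (G : List (List Int)) (n : Nat) (u v : Nat) (vis : List Bool)
    (hlen : n ≤ vis.length) (f1 f2 : Nat) (h1 : cFalse vis ≤ f1) (h12 : f1 ≤ f2) :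
    scanS G n f1 u v vis = scanS G n f2 u v vis := by
  induction f2, h12 using Nat.le_induction with
  | base => rfl
  | succ f2 hle ih => rw [ih, scanS_mono G n f2 u v vis hlen (by omega)]

-- findNextB facts
theorem fnB_spec (G : List (List Int)) (n : Nat) (vis : List Bool) (node j : Nat)
    (h : findNextB G n vis node j < n) :
    ¬ vis.getD (findNextB G n vis node j) false = true ∧
      pvEntry G node (findNextB G n vis node j) ≠ 0 := by
  induction j using findNextB.induct G n vis node with
  | case1 x j h1 h2 ih =>
    rw [fnB_step G n vis node x h1 h2] at h ⊢; exact ih h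
  | case2 x j h1 h2 =>
    rw [fnB_found G n vis node x h1 (not_not.mp h2)] at h ⊢
    exact not_not.mp h2
  | case3 x j h1 => rw [fnB_stop G n vis node x h1] at h; omega

theorem fnB_scan (G : List (List Int)) (n : Nat) (vis : List Bool) (node j : Nat) (f : Nat) :
    scanS G n f node j vis = scanS G n f node (findNextB G n vis node j) vis := by
  induction j using findNextB.induct G n vis node with
  | case1 x j h1 h2 ih =>
    rw [fnB_step G n vis node x h1 h2, scanS_skip G n f node x vis h1 h2]; exact ih
  | case2 x j h1 h2 => rw [fnB_found G n vis node x h1 (not_not.mp h2)]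
  | case3 x j h1 => rw [fnB_stop G n vis node x h1]

-- runB equations
theorem runB_cons (G : List (List Int)) (n u f node j : Nat) (rest : List (Nat × Nat))
    (vis : List Bool) (cnt : Int) :
    runB G n u (f + 1) ((node, j) :: rest) vis cnt =
      (if findNextB G n vis node j < n then
        runB G n u f ((findNextB G n vis node j, 0) :: (node, findNextB G n vis node j + 1) :: rest)
          (vis.set (findNextB G n vis node j) true)
          (if node = u then cnt + 1 else cnt)
      else runB G n u f rest vis cnt) := rfl

theorem runB_mono (G : List (List Int)) (n u : Nat) :
    ∀ (f : Nat) (stack : List (Nat × Nat)) (vis : List Bool) (cnt : Int),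
      n ≤ vis.length → 2 * cFalse vis + stack.length ≤ f →
      runB G n u f stack vis cnt = runB G n u (f + 1) stack vis cnt := by
  intro f
  induction f with
  | zero =>
    intro stack vis cnt hlen hb
    match stack with
    | [] => rfl
    | _ :: _ => simp at hb
  | succ f ih =>
    intro stack vis cnt hlen hb
    match stack with
    | [] => rfl
    | (node, j) :: rest =>
      rw [runB_cons, runB_cons]
      by_cases hj : findNextB G n vis node j < n
      · rw [if_pos hj, if_pos hj]
        have hspec := fnB_spec G n vis node j hj
        have hvv : vis.getD (findNextB G n vis node j) false = false := bool_false hspec.1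
        have hc := cFalse_set vis _ (by omega) hvv
        refine ih _ _ _ (by simpa using hlen) ?_
        simp only [List.length_cons] at hb ⊢
        omega
      · rw [if_neg hj, if_neg hj]
        refine ih _ _ _ hlen ?_
        simp only [List.length_cons] at hb
        omega

theorem runB_ge (G : List (List Int)) (n u : Nat) (stack : List (Nat × Nat)) (vis : List Bool)
    (cnt : Int) (hlen : n ≤ vis.length) (f1 f2 : Nat)
    (h1 : 2 * cFalse vis + stack.length ≤ f1) (h12 : f1 ≤ f2) :
    runB G n u f1 stack vis cnt = runB G n u f2 stack vis cnt := by
  induction f2, h12 using Nat.le_induction with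
  | base => rfl
  | succ f2 hle ih => rw [ih, runB_mono G n u f2 stack vis cnt hlen (by omega)]
theorem mainSim (G : List (List Int)) (n u : Nat) :
    ∀ (k : Nat) (vis : List Bool), cFalse vis = k → n ≤ vis.length →
      vis.getD u false = true →
      ∀ (node j : Nat) (rest : List (Nat × Nat)) (cnt : Int) (f : Nat),
        2 * k + (rest.length + 1) ≤ f →
        runB G n u f ((node, j) :: rest) vis cnt =
          runB G n u f rest (scanS G n k node j vis).1
            (cnt + if node = u then (scanS G n k node j vis).2 else 0) := by
  intro k
  induction k using Nat.strong_induction_on with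
  | _ k ih =>
    intro vis hk hlen hu node j rest cnt f hf
    obtain ⟨f', rfl⟩ : ∃ f', f = f' + 1 := ⟨f - 1, by omega⟩
    rw [runB_cons]
    by_cases hjn : findNextB G n vis node j < n
    · set j' := findNextB G n vis node j with hj'
      have hspec := fnB_spec G n vis node j hjn
      have hvv : vis.getD j' false = false := bool_false hspec.1
      have hne : j' ≠ u := by
        intro e; rw [e, hu] at hvv; cases hvv
      have hc : cFalse vis = cFalse (vis.set j' true) + 1 := cFalse_set vis j' (by omega) hvv
      obtain ⟨k', hkk⟩ : ∃ k', k = k' + 1 := ⟨cFalse (vis.set j' true), by omega⟩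
      have hck' : cFalse (vis.set j' true) = k' := by omega
      rw [if_pos hjn]
      have h1 := ih k' (by omega) (vis.set j' true) hck' (by simpa using hlen)
        (by rw [getD_set_ne _ _ _ hne]; exact hu)
        j' 0 ((node, j' + 1) :: rest) (if node = u then cnt + 1 else cnt) f'
        (by simp only [List.length_cons]; omega)
      rw [h1, if_neg hne, add_zero]
      have hT1len : n ≤ (scanS G n k' j' 0 (vis.set j' true)).1.length := by
        rw [scanS_length]; simpa using hlen
      have hTu : (scanS G n k' j' 0 (vis.set j' true)).1.getD u false = true := by
        apply scanS_true_mono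
        rw [getD_set_ne _ _ _ hne]; exact hu
      have hkT : cFalse (scanS G n k' j' 0 (vis.set j' true)).1 ≤ k' :=
        le_trans (scanS_cfalse_le G n k' j' 0 (vis.set j' true)) (le_of_eq hck')
      have h2 := ih (cFalse (scanS G n k' j' 0 (vis.set j' true)).1) (by omega)
        (scanS G n k' j' 0 (vis.set j' true)).1 rfl hT1len hTu node (j' + 1) rest
        (if node = u then cnt + 1 else cnt) f' (by omega)
      rw [h2]
      -- rewrite the RHS scan into its adopt form
      rw [fnB_scan G n vis node j k, ← hj', hkk,
        scanS_adopt G n k' node j' vis hjn hspec]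
      dsimp only
      have hW : scanS G n (cFalse (scanS G n k' j' 0 (vis.set j' true)).1) node (j' + 1)
            (scanS G n k' j' 0 (vis.set j' true)).1 =
          scanS G n (k' + 1) node (j' + 1) (scanS G n k' j' 0 (vis.set j' true)).1 :=
        scanS_ge G n node (j' + 1) _ hT1len _ _ le_rfl (by omega)
      rw [hW]
      have hcnt : ((if node = u then cnt + 1 else cnt) +
            if node = u then (scanS G n (k' + 1) node (j' + 1)
              (scanS G n k' j' 0 (vis.set j' true)).1).2 else 0) =
          (cnt + if node = u then (scanS G n (k' + 1) node (j' + 1)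
              (scanS G n k' j' 0 (vis.set j' true)).1).2 + 1 else 0) := by
        split <;> omega
      rw [hcnt]
      apply runB_ge
      · rw [scanS_length, scanS_length]; simpa using hlen
      · have : cFalse (scanS G n (k' + 1) node (j' + 1)
            (scanS G n k' j' 0 (vis.set j' true)).1).1 ≤ k' :=
          le_trans (scanS_cfalse_le _ _ _ _ _ _) hkT
        omega
      · omega
    · rw [if_neg hjn]
      rw [fnB_scan G n vis node j k, scanS_stop G n k node _ vis hjn]
      dsimp only
      have hz : (cnt + if node = u then (0 : Int) else 0) = cnt := by split <;> omega
      rw [hz]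
      exact runB_ge G n u rest vis cnt hlen f' (f' + 1) (by omega) (by omega)
theorem countU_foldl (u : Nat) (l : List (Option Nat)) :
    ∀ (c : Int), l.foldl (fun (c : Int) i => if i = some u then c + 1 else c) c = c + countU l u := by
  induction l with
  | nil => intro c; simp [countU]
  | cons a t ih =>
    intro c
    rw [List.foldl_cons, ih]
    simp only [countU]
    split <;> omega

theorem countU_cons (u : Nat) (a : Option Nat) (t : List (Option Nat)) :
    countU (a :: t) u = (if a = some u then 1 else 0) + countU t u := rfl

theorem parGetD_set_ne (l : List (Option Nat)) (i j : Nat) (x : Option Nat) (h : i ≠ j) :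
    (l.set i x).getD j none = l.getD j none := by
  simp [List.getD_eq_getElem?_getD, List.getElem?_set_ne h]

theorem countU_set (u : Nat) :
    ∀ (l : List (Option Nat)) (v : Nat) (x : Option Nat), v < l.length →
      l.getD v none ≠ some u →
      countU (l.set v x) u = countU l u + (if x = some u then 1 else 0) := by
  intro l
  induction l with
  | nil => intro v x hv; simp at hv
  | cons a t ih =>
    intro v x hv ha
    match v with
    | 0 =>
      simp only [List.set_cons_zero, countU_cons]
      have : ¬ a = some u := by simpa using ha
      rw [if_neg this]
      omega
    | v' + 1 =>
      simp only [List.set_cons_succ, countU_cons]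
      rw [ih v' x (by simpa using hv) (by simpa using ha)]
      omega

theorem countU_replicate (u : Nat) (m : Nat) : countU (List.replicate m none) u = 0 := by
  induction m with
  | zero => simp [countU]
  | succ m ih => rw [List.replicate_succ, countU_cons, ih]; simp

theorem acount (G : List (List Int)) (n u : Nat) (f node j : Nat) (vis : List Bool)
    (par : List (Option Nat)) :
    n ≤ vis.length → par.length = vis.length → vis.getD u false = true →
    (∀ w, par.getD w none = some u → vis.getD w false = true) →
    (dfsScanA G n f node j vis par).1 = (scanS G n f node j vis).1 ∧
    (dfsScanA G n f node j vis par).2.length = par.length ∧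
    countU (dfsScanA G n f node j vis par).2 u =
      countU par u + (if node = u then (scanS G n f node j vis).2 else 0) ∧
    (∀ w, (dfsScanA G n f node j vis par).2.getD w none = some u →
      (dfsScanA G n f node j vis par).1.getD w false = true) := by
  induction f, node, j, vis, par using dfsScanA.induct G n with
  | case1 nd v vis par h1 h2 =>
    intro hlen hpar hu hinv
    rw [dfsScanA_zero G n nd v vis par h1 h2, scanS_zero G n nd v vis h1 h2]
    refine ⟨rfl, rfl, by simp, hinv⟩
  | case2 nd v vis par h1 h2 f' r ih1 ih2 =>
    intro hlen hpar hu hinv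
    have hvv : vis.getD v false = false := bool_false h2.1
    have hvu : v ≠ u := by intro e; rw [e, hu] at hvv; cases hvv
    have hvl : v < vis.length := by omega
    -- invariants for the child call
    have hc1 := ih1 (by simpa using hlen) (by simp [hpar])
      (by rw [getD_set_ne _ _ _ hvu]; exact hu)
      (by
        intro w hw
        by_cases hwv : w = v
        · subst hwv; exact getD_set_self _ _ hvl
        · rw [parGetD_set_ne _ _ _ _ (fun e => hwv e.symm)] at hw
          rw [getD_set_ne _ _ _ (fun e => hwv e.symm)]
          exact hinv w hw)
    obtain ⟨c1, c2, c3, c4⟩ := hc1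
    -- invariants for the continuation call
    have hc2 := ih2 (by rw [c1, scanS_length]; simpa using hlen)
      (by rw [c2, c1, scanS_length]; simp [hpar])
      (by
        rw [c1]
        apply scanS_true_mono
        rw [getD_set_ne _ _ _ hvu]
        exact hu)
      c4
    obtain ⟨d1, d2, d3, d4⟩ := hc2
    rw [dfsScanA_adopt G n f' nd v vis par h1 h2, scanS_adopt G n f' nd v vis h1 h2]
    dsimp only
    refine ⟨by rw [d1, c1], by rw [d2, c2, List.length_set], ?_, d4⟩
    rw [d3, c3, c1]
    have hpv : par.getD v none ≠ some u := fun e => by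
      have := hinv v e; rw [this] at hvv; cases hvv
    rw [countU_set u par v (some nd) (by omega) hpv]
    simp only [Option.some.injEq]
    split_ifs <;> omega
  | case3 f nd v vis par h1 h2 ih =>
    intro hlen hpar hu hinv
    rw [dfsScanA_skip G n f nd v vis par h1 h2, scanS_skip G n f nd v vis h1 h2]
    exact ih hlen hpar hu hinv
  | case4 f nd v vis par h1 =>
    intro hlen hpar hu hinv
    rw [dfsScanA_stop G n f nd v vis par h1, scanS_stop G n f nd v vis h1]
    refine ⟨rfl, rfl, by simp, hinv⟩
-- the two per-root counts, as computed by the ports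
def cA (G : List (List Int)) (u : Nat) : Int :=
  (dfsRecA G G.length G.length u (List.replicate G.length false)
      (List.replicate G.length none)).2.foldl
    (fun (c : Int) i => if i = some u then c + 1 else c) 0

def cB (G : List (List Int)) (u : Nat) : Int :=
  runB G G.length u (2 * G.length + 2) [(u, 0)]
    ((List.replicate G.length false).set u true) 0

theorem DFS_eq (G : List (List Int)) :
    DFS G =
      (let st := (List.range G.length).foldl
        (fun (st : Int × Option Int) u =>
          if st.1 < cA G u ∧ 1 < cA G u then (cA G u, some (u : Int)) else st) (-1, none)
       if st.1 = -1 then none else st.2) := rfl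

theorem DFS_alt_eq (G : List (List Int)) :
    DFS_alt G =
      (let st := (List.range G.length).foldl
        (fun (st : Option Int × Int) u =>
          if st.2 < cB G u then (some (u : Int), cB G u) else st) (none, 1)
       st.1) := rfl

theorem runB_nil (G : List (List Int)) (n u f : Nat) (vis : List Bool) (cnt : Int) :
    runB G n u f [] vis cnt = cnt := by
  cases f <;> rfl

theorem replicate_getD_none (m w : Nat) :
    (List.replicate m (none : Option Nat)).getD w none = none := by
  simp [List.getD_eq_getElem?_getD, List.getElem?_replicate]
  split <;> rfl

theorem perRoot (G : List (List Int)) (u : Nat) (hu : u < G.length) : cA G u = cB G u := by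
  set n := G.length with hn
  set vis0 := (List.replicate n false).set u true with hvis0
  have hrl : (List.replicate n false).length = n := by simp
  have hv0len : vis0.length = n := by simp [hvis0]
  have hv0u : vis0.getD u false = true := getD_set_self _ _ (by omega)
  have hrf : (List.replicate n false).getD u false = false := by
    simp [List.getD_eq_getElem?_getD, hu]
  have hcr : cFalse (List.replicate n false) = n := by simp [cFalse]
  have hcv0 : cFalse vis0 = n - 1 := by
    have h := cFalse_set (List.replicate n false) u (by omega) hrf
    rw [← hvis0] at h
    omega
  -- A's counter equals the adoption count of the root scan
  have hA := acount G n u n u 0 vis0 (List.replicate n none)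
    (by omega) (by simp [hv0len]) hv0u
    (by intro w hw; rw [replicate_getD_none] at hw; cases hw)
  have hcA : cA G u = (scanS G n n u 0 vis0).2 := by
    rw [cA, dfsRecA, ← hn, ← hvis0]
    rw [countU_foldl u _ 0, hA.2.2.1, countU_replicate, if_pos rfl]
    omega
  -- B's stack machine computes the same adoption count
  have hB := mainSim G n u (n - 1) vis0 hcv0 (by omega) hv0u u 0 [] 0 (2 * n + 2)
    (by simp only [List.length_nil]; omega)
  have hcB : cB G u = (scanS G n (n - 1) u 0 vis0).2 := by
    rw [cB, ← hn, hB, runB_nil, if_pos rfl]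
    omega
  rw [hcA, hcB]
  rw [scanS_ge G n u 0 vis0 (by omega) (n - 1) n (by omega) (by omega)]

theorem selRel (f g : Nat → Int) :
    ∀ (l : List Nat), (∀ x ∈ l, f x = g x) →
    ∀ (a : Int × Option Int) (b : Option Int × Int),
      ((a.1 = -1 ∧ a.2 = none ∧ b.1 = none ∧ b.2 = 1) ∨ (2 ≤ a.1 ∧ b.1 = a.2 ∧ b.2 = a.1)) →
      (((l.foldl (fun st u => if st.1 < f u ∧ 1 < f u then (f u, some (u : Int)) else st) a).1 = -1 ∧
        (l.foldl (fun st u => if st.1 < f u ∧ 1 < f u then (f u, some (u : Int)) else st) a).2 = none ∧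
        (l.foldl (fun st u => if st.2 < g u then (some (u : Int), g u) else st) b).1 = none ∧
        (l.foldl (fun st u => if st.2 < g u then (some (u : Int), g u) else st) b).2 = 1) ∨
       (2 ≤ (l.foldl (fun st u => if st.1 < f u ∧ 1 < f u then (f u, some (u : Int)) else st) a).1 ∧
        (l.foldl (fun st u => if st.2 < g u then (some (u : Int), g u) else st) b).1 =
          (l.foldl (fun st u => if st.1 < f u ∧ 1 < f u then (f u, some (u : Int)) else st) a).2 ∧
        (l.foldl (fun st u => if st.2 < g u then (some (u : Int), g u) else st) b).2 =
          (l.foldl (fun st u => if st.1 < f u ∧ 1 < f u then (f u, some (u : Int)) else st) a).1)) := by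
  intro l
  induction l with
  | nil => intro _ a b h; simpa using h
  | cons x t ih =>
    intro hfg a b h
    simp only [List.foldl_cons]
    apply ih (fun y hy => hfg y (List.mem_cons_of_mem x hy))
    have hx : f x = g x := hfg x List.mem_cons_self
    rcases h with ⟨h1, h2, h3, h4⟩ | ⟨h1, h2, h3⟩
    · by_cases hc : 1 < f x
      · rw [if_pos ⟨by omega, hc⟩, if_pos (by rw [h4, ← hx]; omega)]
        right; exact ⟨by dsimp; omega, rfl, hx.symm⟩
      · rw [if_neg (by intro hh; exact hc hh.2), if_neg (by rw [h4, ← hx]; omega)]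
        left; exact ⟨h1, h2, h3, h4⟩
    · by_cases hc : a.1 < f x
      · rw [if_pos ⟨hc, by omega⟩, if_pos (by rw [h3, ← hx]; omega)]
        right; exact ⟨by dsimp; omega, rfl, hx.symm⟩
      · rw [if_neg (by intro hh; exact hc hh.1), if_neg (by rw [h3, ← hx]; omega)]
        right; exact ⟨h1, h2, h3⟩
-- ===== VERDICT (by name: the statement is the Claim_ definition above) =====
theorem DFS_spec : Claim_equal_DFS := by
  unfold Claim_equal_DFS
  intro G _dom _pre
  unfold Spec_DFS
  rw [DFS_eq, DFS_alt_eq]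
  have hsel := selRel (cA G) (cB G) (List.range G.length)
    (fun x hx => perRoot G x (List.mem_range.mp hx)) (-1, none) (none, 1)
    (Or.inl ⟨rfl, rfl, rfl, rfl⟩)
  dsimp only
  rcases hsel with ⟨h1, _h2, h3, _h4⟩ | ⟨h1, h2, _h3⟩
  · rw [if_pos h1]; exact h3.symm
  · rw [if_neg (by omega)]; exact h2.symm
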